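-- pv_equiv track=rewrite | github.com/Houssem-25/anki_generator | src/anki_generator.py | _clean_german_word
-- ===== SOURCE A (Python) =====
-- def _clean_german_word(word):
--     """Removes common German articles and leading/trailing spaces."""
--     cleaned = word.strip().lower()
--     articles = ["der ", "die ", "das "]
--     for article in articles:
--         if cleaned.startswith(article):
--             cleaned = cleaned[len(article):]
--             break
--     return cleaned
-- ===== SOURCE B (Python) =====
-- def _clean_german_word(word):
--     """Removes common German articles and leading/trailing spaces."""
--     cleaned = word.strip().lower()
--     parts = cleaned.split(' ', 1)
--     if len(parts) == 2 and parts[0] in {"der", "die", "das"}: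
--         return parts[1]
--     return cleaned
-- ===== Notes on version B (the rewrite author's own statement) =====
-- stated objective: idiomatic
-- what changed: Replaces the loop that scans a list of article prefixes with startswith/slicing by a single split on the first space plus a set lookup of the first token.
import Mathlib
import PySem

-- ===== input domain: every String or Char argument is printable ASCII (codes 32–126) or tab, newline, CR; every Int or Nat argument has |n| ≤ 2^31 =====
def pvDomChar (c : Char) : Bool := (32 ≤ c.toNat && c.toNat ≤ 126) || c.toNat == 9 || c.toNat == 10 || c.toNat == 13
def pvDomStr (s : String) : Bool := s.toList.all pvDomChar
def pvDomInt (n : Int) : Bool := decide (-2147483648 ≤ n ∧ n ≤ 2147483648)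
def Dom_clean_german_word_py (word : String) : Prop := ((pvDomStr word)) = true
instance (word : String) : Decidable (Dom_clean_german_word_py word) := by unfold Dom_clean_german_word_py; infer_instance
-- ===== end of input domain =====

-- B replaces A's article-prefix scanning loop (startswith + slice per article) by a single
-- split on the first space plus a set lookup of the first token (objective: idiomatic).

-- ===== PORT A =====
-- the for-loop over `articles` with `break`: first matching article strips, then stop
def cgw_loop (cleaned : String) : List String → String
  | [] => cleaned
  | article :: rest =>
    if PySem.Str.startswith cleaned article then
      PySem.Str.slice cleaned (some (PySem.Str.len article)) none
    else cgw_loop cleaned rest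

def clean_german_word_py (word : String) : String :=
  cgw_loop (PySem.Str.lower (PySem.Str.strip word)) ["der ", "die ", "das "]

-- ===== PORT B =====
def clean_german_word_py_alt (word : String) : String :=
  let cleaned := PySem.Str.lower (PySem.Str.strip word)
  match PySem.Str.splitMax? cleaned " " 1 with
  | some [first, rest] =>
      if (PySem.Set.ofList ["der", "die", "das"]).contains first then rest else cleaned
  | _ => cleaned

-- ===== PRECONDITION & SPEC =====
def Spec_clean_german_word_py (word : String) (out : String) : Prop := out = clean_german_word_py_alt word
instance (word : String) (out : String) : Decidable (Spec_clean_german_word_py word out) := by unfold Spec_clean_german_word_py; infer_instance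

-- ===== CLAIM (what is proved, stated in full; the proofs are below) =====
def Claim_equal_clean_german_word_py : Prop := ∀ (word : String), Dom_clean_german_word_py word → Spec_clean_german_word_py word (clean_german_word_py word)

-- ===== LEMMAS AND PROOFS =====

-- splitOnMax.go with maxsplit exhausted returns the remainder as the final piece
lemma cgw_go_zero (fuel : Nat) (l cur : List Char) (acc : List (List Char)) :
    PySem.Chars.splitOnMax.go [' '] fuel 0 l cur acc = ((cur.reverse ++ l) :: acc).reverse := by
  cases fuel <;> cases l <;> simp [PySem.Chars.splitOnMax.go]

-- splitOnMax.go with maxsplit 1: split at the first space if any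
lemma cgw_go_one (fuel : Nat) (l cur : List Char) (acc : List (List Char)) (h : l.length < fuel) :
    PySem.Chars.splitOnMax.go [' '] fuel 1 l cur acc =
      if ' ' ∈ l then
        ((l.dropWhile (· ≠ ' ')).tail :: (cur.reverse ++ l.takeWhile (· ≠ ' ')) :: acc).reverse
      else ((cur.reverse ++ l) :: acc).reverse := by
  induction fuel generalizing l cur acc with
  | zero => omega
  | succ n ih =>
    cases l with
    | nil => simp [PySem.Chars.splitOnMax.go]
    | cons c rest =>
      by_cases hc : c = ' '
      · subst hc
        simp only [PySem.Chars.splitOnMax.go]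
        rw [if_neg one_ne_zero, if_pos (by simp [List.isPrefixOf])]
        rw [show (1 : Nat) - 1 = 0 from rfl, cgw_go_zero]
        simp
      · have hpre : ([' '].isPrefixOf (c :: rest)) = false := by
          simp [List.isPrefixOf]
          exact fun h' => hc h'.symm
        simp only [PySem.Chars.splitOnMax.go, hpre]
        rw [if_neg one_ne_zero, if_neg (by simp)]
        rw [ih rest (c :: cur) acc (by simpa using Nat.lt_of_succ_lt_succ h)]
        simp [List.mem_cons, hc, (show ¬(' ' = c) from fun h' => hc h'.symm)]
      
-- characterisation of s.split(' ', 1) on the char list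
lemma cgw_split1 (cs : List Char) :
    PySem.Chars.splitOnMax cs [' '] 1 =
      if ' ' ∈ cs then [cs.takeWhile (· ≠ ' '), (cs.dropWhile (· ≠ ' ')).tail] else [cs] := by
  unfold PySem.Chars.splitOnMax
  rw [if_neg (by omega)]
  rw [show (1 : Int).toNat = 1 from rfl, cgw_go_one cs.length.succ cs [] [] (Nat.lt_succ_self _)]
  split <;> simp

-- a space is in cs as soon as some article-plus-space is a prefix of cs
lemma cgw_space_of_prefix {art cs : List Char} (hm : ' ' ∈ art)
    (h : art.isPrefixOf cs = true) : ' ' ∈ cs :=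
  (List.isPrefixOf_iff_prefix.mp h).subset hm

-- if a space occurs in cs then cs = takeWhile ++ ' ' :: (dropWhile).tail
lemma cgw_decomp {cs : List Char} (h : ' ' ∈ cs) :
    cs = cs.takeWhile (· ≠ ' ') ++ ' ' :: (cs.dropWhile (· ≠ ' ')).tail := by
  induction cs with
  | nil => simp at h
  | cons c rest ih =>
    by_cases hc : c = ' '
    · subst hc; simp
    · have hr : ' ' ∈ rest := by
        rcases List.mem_cons.mp h with h' | h'
        · exact absurd h'.symm hc
        · exact h'
      rw [List.takeWhile_cons_of_pos (by simp [hc]), List.dropWhile_cons_of_pos (by simp [hc]),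
        List.cons_append]
      exact congrArg (List.cons c) (ih hr)

-- all article characters differ from the space, so takeWhile stops exactly at the separator
lemma cgw_tw (art tl : List Char) (h : ∀ c ∈ art, c ≠ ' ') :
    (art ++ ' ' :: tl).takeWhile (fun c => decide (c ≠ ' ')) = art := by
  induction art with
  | nil => simp
  | cons a as ih =>
    rw [List.cons_append, List.takeWhile_cons_of_pos (by simp [h a (by simp)]),
      ih (fun c hc => h c (by simp [hc]))]

-- the main equivalence, stated over an arbitrary already-cleaned string
lemma cgw_main (cleaned : String) :
    cgw_loop cleaned ["der ", "die ", "das "] =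
      (match PySem.Str.splitMax? cleaned " " 1 with
       | some [first, rest] =>
           if (PySem.Set.ofList ["der", "die", "das"]).contains first then rest else cleaned
       | _ => cleaned) := by
  have hsplit : PySem.Str.splitMax? cleaned " " 1 =
      some ((PySem.Chars.splitOnMax cleaned.toList [' '] 1).map String.ofList) := by
    simp [PySem.Str.splitMax?, PySem.Chars.splitMax?]
  rw [hsplit, cgw_split1]
  by_cases hsp : ' ' ∈ cleaned.toList
  · -- a space exists: the split has two pieces
    have hdec := cgw_decomp hsp
    set t := cleaned.toList.takeWhile (· ≠ ' ') with ht
    set d := (cleaned.toList.dropWhile (· ≠ ' ')).tail with hd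
    rw [if_pos hsp]
    by_cases h1 : t = ['d', 'e', 'r']
    · have hpre : PySem.Chars.startswith cleaned.toList ['d', 'e', 'r', ' '] = true := by
        rw [hdec, h1]; rfl
      have hslice : PySem.Str.slice cleaned (some 4) none = String.ofList d := by
        apply String.toList_inj.mp
        rw [PySem.Str.toList_slice, String.toList_ofList, PySem.Chars.slice_eq_listSlice,
          PySem.List.slice_from _ (by norm_num : (0 : Int) ≤ 4), hdec, h1]
        rfl
      have hofs : String.ofList t = "der" := by rw [h1]
      simp [cgw_loop, hpre, hslice, hofs]
    · by_cases h2 : t = ['d', 'i', 'e']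
      · have hpre1 : PySem.Chars.startswith cleaned.toList ['d', 'e', 'r', ' '] = false := by
          rw [hdec, h2]; rfl
        have hpre : PySem.Chars.startswith cleaned.toList ['d', 'i', 'e', ' '] = true := by
          rw [hdec, h2]; rfl
        have hslice : PySem.Str.slice cleaned (some 4) none = String.ofList d := by
          apply String.toList_inj.mp
          rw [PySem.Str.toList_slice, String.toList_ofList, PySem.Chars.slice_eq_listSlice,
            PySem.List.slice_from _ (by norm_num : (0 : Int) ≤ 4), hdec, h2]
          rfl
        have hofs : String.ofList t = "die" := by rw [h2]
        simp [cgw_loop, hpre1, hpre, hslice, hofs]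
      · by_cases h3 : t = ['d', 'a', 's']
        · have hpre1 : PySem.Chars.startswith cleaned.toList ['d', 'e', 'r', ' '] = false := by
            rw [hdec, h3]; rfl
          have hpre2 : PySem.Chars.startswith cleaned.toList ['d', 'i', 'e', ' '] = false := by
            rw [hdec, h3]; rfl
          have hpre : PySem.Chars.startswith cleaned.toList ['d', 'a', 's', ' '] = true := by
            rw [hdec, h3]; rfl
          have hslice : PySem.Str.slice cleaned (some 4) none = String.ofList d := by
            apply String.toList_inj.mp
            rw [PySem.Str.toList_slice, String.toList_ofList, PySem.Chars.slice_eq_listSlice,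
              PySem.List.slice_from _ (by norm_num : (0 : Int) ≤ 4), hdec, h3]
            rfl
          have hofs : String.ofList t = "das" := by rw [h3]
          simp [cgw_loop, hpre1, hpre2, hpre, hslice, hofs]
        · -- first token is no article: the loop matches nothing
          have hart : ∀ art : List Char, (∀ c ∈ art, c ≠ ' ') → t ≠ art →
              PySem.Chars.startswith cleaned.toList (art ++ [' ']) = false := by
            intro art hnospace hne
            by_contra hcontra
            have htrue : PySem.Chars.startswith cleaned.toList (art ++ [' ']) = true := by
              cases hb : PySem.Chars.startswith cleaned.toList (art ++ [' ']) with
              | false => exact absurd hb hcontra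
              | true => rfl
            obtain ⟨tl, htl⟩ :=
              List.isPrefixOf_iff_prefix.mp htrue
            have : cleaned.toList.takeWhile (· ≠ ' ') = art := by
              rw [← htl, List.append_assoc]
              exact cgw_tw art tl hnospace
            exact hne (ht ▸ this)
          have e1 : PySem.Chars.startswith cleaned.toList ['d', 'e', 'r', ' '] = false := by
            simpa using hart ['d', 'e', 'r'] (by simp) h1
          have e2 : PySem.Chars.startswith cleaned.toList ['d', 'i', 'e', ' '] = false := by
            simpa using hart ['d', 'i', 'e'] (by simp) h2
          have e3 : PySem.Chars.startswith cleaned.toList ['d', 'a', 's', ' '] = false := by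
            simpa using hart ['d', 'a', 's'] (by simp) h3
          have hc1 : String.ofList t ≠ "der" := fun h =>
            h1 (by have h' := congrArg String.toList h; simpa using h')
          have hc2 : String.ofList t ≠ "die" := fun h =>
            h2 (by have h' := congrArg String.toList h; simpa using h')
          have hc3 : String.ofList t ≠ "das" := fun h =>
            h3 (by have h' := congrArg String.toList h; simpa using h')
          simp [cgw_loop, e1, e2, e3, hc1, hc2, hc3]
  · -- no space: no article can match and the split is a single piece
    rw [if_neg hsp]
    have hart : ∀ art : List Char, ' ' ∈ art →
        PySem.Chars.startswith cleaned.toList art = false := by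
      intro art hm
      cases hb : PySem.Chars.startswith cleaned.toList art with
      | true => exact absurd (cgw_space_of_prefix hm hb) hsp
      | false => rfl
    have e1 : PySem.Chars.startswith cleaned.toList ['d', 'e', 'r', ' '] = false := hart _ (by decide)
    have e2 : PySem.Chars.startswith cleaned.toList ['d', 'i', 'e', ' '] = false := hart _ (by decide)
    have e3 : PySem.Chars.startswith cleaned.toList ['d', 'a', 's', ' '] = false := hart _ (by decide)
    simp [cgw_loop, e1, e2, e3]

-- ===== VERDICT (by name: the statement is the Claim_ definition above) =====
theorem clean_german_word_py_spec : Claim_equal_clean_german_word_py := by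
  intro word _
  unfold Spec_clean_german_word_py
  show clean_german_word_py word = clean_german_word_py_alt word
  simp only [clean_german_word_py, clean_german_word_py_alt]
  exact cgw_main (PySem.Str.lower (PySem.Str.strip word))
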